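-- pv_equiv track=rewrite | github.com/ABruihler/saad | module_runner.py | split_for_format
-- ===== SOURCE A (Python) =====
-- def split_for_format(command):
--     symbol = '%'
--     output = ['']
--
--     preceded_by_symbol = False
--     for char in command:
--         if char == symbol:
--             if preceded_by_symbol:
--                 preceded_by_symbol = False
--                 output[-1] += symbol
--             else:
--                 preceded_by_symbol = True
--         else:
--             if preceded_by_symbol:
--                 preceded_by_symbol = False
--                 output.append('')
--             output[-1] += char
--
--     if preceded_by_symbol:
--         output.append('')
--
--     return output
-- ===== SOURCE B (Python) =====
-- def split_for_format(command):
--     # run-length scan: handle each maximal run of identical characters at once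
--     output = ['']
--     i, n = 0, len(command)
--     while i < n:
--         ch = command[i]
--         j = i
--         while j < n and command[j] == ch:
--             j += 1
--         k = j - i
--         if ch == '%':
--             output[-1] += '%' * (k // 2)
--             if k % 2 == 1:
--                 output.append('')
--         else:
--             output[-1] += command[i:j]
--         i = j
--     return output
-- ===== Notes on version B (the rewrite author's own statement) =====
-- stated objective: alternative
-- what changed: Replaced the char-by-char state machine with a preceded_by_symbol flag by a run-length scan: each maximal run of k '%' contributes '%'*(k//2) to the current token plus a new token if k is odd, and a non-'%' run is appended as one slice.
import Mathlib
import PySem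

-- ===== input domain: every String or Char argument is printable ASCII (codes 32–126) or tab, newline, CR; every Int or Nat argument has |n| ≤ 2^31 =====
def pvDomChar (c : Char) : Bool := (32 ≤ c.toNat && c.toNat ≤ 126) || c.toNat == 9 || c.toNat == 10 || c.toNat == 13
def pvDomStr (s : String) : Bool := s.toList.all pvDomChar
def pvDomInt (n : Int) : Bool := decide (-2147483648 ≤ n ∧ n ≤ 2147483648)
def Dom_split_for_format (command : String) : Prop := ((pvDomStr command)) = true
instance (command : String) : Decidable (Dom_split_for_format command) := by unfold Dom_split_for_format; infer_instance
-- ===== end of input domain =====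

-- B replaces A's char-by-char flag state machine by a run-length scan over maximal runs
-- of identical characters (alternative decomposition, same return value).


-- ===== PORT A =====
-- shared helper: Python's `output[-1] += s` (output is never empty; [] case is vacuous)
def appendLast : List String → String → List String
  | [], s => [s]
  | [x], s => [x ++ s]
  | x :: y :: xs, s => x :: appendLast (y :: xs) s

-- A's loop body: state = (output, preceded_by_symbol)
def aStep (st : List String × Bool) (ch : Char) : List String × Bool :=
  if ch = '%' then
    if st.2 then (appendLast st.1 (String.ofList ['%']), false)
    else (st.1, true)
  else
    if st.2 then (appendLast (st.1 ++ [""]) (String.ofList [ch]), false)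
    else (appendLast st.1 (String.ofList [ch]), false)

def split_for_format (command : String) : List String :=
  let st := command.toList.foldl aStep ([""], false)
  if st.2 then st.1 ++ [""] else st.1

-- ===== PORT B =====
-- B's inner while loop: the maximal run of identical characters at the front
-- (takeWhile/dropWhile compute exactly Source B's j-scan: run length and the rest)
def runsB : List Char → List (Char × Nat)
  | [] => []
  | c :: cs => (c, (cs.takeWhile (· == c)).length + 1) :: runsB (cs.dropWhile (· == c))
  termination_by l => l.length
  decreasing_by
    simp only [List.length_cons]
    exact Nat.lt_succ_of_le (List.dropWhile_sublist _).length_le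

-- B's outer loop body for one run (ch, k)
def bStep (out : List String) (r : Char × Nat) : List String :=
  if r.1 = '%' then
    let o2 := appendLast out (String.ofList (List.replicate (r.2 / 2) '%'))
    if r.2 % 2 = 1 then o2 ++ [""] else o2
  else appendLast out (String.ofList (List.replicate r.2 r.1))

def split_for_format_alt (command : String) : List String :=
  (runsB command.toList).foldl bStep [""]

-- ===== PRECONDITION & SPEC =====
def Spec_split_for_format (command : String) (out : List String) : Prop := out = split_for_format_alt command
instance (command : String) (out : List String) : Decidable (Spec_split_for_format command out) := by unfold Spec_split_for_format; infer_instance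

-- ===== CLAIM (what is proved, stated in full; the proofs are below) =====
def Claim_equal_split_for_format : Prop := ∀ (command : String), Dom_split_for_format command → Spec_split_for_format command (split_for_format command)

-- ===== LEMMAS AND PROOFS =====

-- finalization of A's state
def aFin (st : List String × Bool) : List String :=
  if st.2 then st.1 ++ [""] else st.1

lemma appendLast_ne_nil (o : List String) (s : String) : appendLast o s ≠ [] := by
  cases o with
  | nil => simp [appendLast]
  | cons x xs => cases xs <;> simp [appendLast]

lemma appendLast_append (o : List String) (s t : String) :
    appendLast (appendLast o s) t = appendLast o (s ++ t) := by
  induction o with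
  | nil => simp [appendLast]
  | cons x xs ih =>
    cases xs with
    | nil => simp [appendLast, String.append_assoc]
    | cons y ys =>
      rw [show appendLast (x :: y :: ys) s = x :: appendLast (y :: ys) s from rfl,
          show appendLast (x :: y :: ys) (s ++ t) = x :: appendLast (y :: ys) (s ++ t) from rfl]
      obtain ⟨z, zs, hz⟩ := List.exists_cons_of_ne_nil (appendLast_ne_nil (y :: ys) s)
      rw [hz, show appendLast (x :: z :: zs) t = x :: appendLast (z :: zs) t from rfl, ← hz, ih]

lemma appendLast_empty (o : List String) (ho : o ≠ []) : appendLast o (String.ofList []) = o := by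
  induction o with
  | nil => exact absurd rfl ho
  | cons x xs ih =>
    cases xs with
    | nil => simp [appendLast]
    | cons y ys => rw [show appendLast (x :: y :: ys) (String.ofList []) =
        x :: appendLast (y :: ys) (String.ofList []) from rfl, ih (by simp)]

-- A on a run of k '%' starting with the flag down
lemma pctRun (k : Nat) : ∀ o : List String, o ≠ [] →
    (List.replicate k '%').foldl aStep (o, false) =
      (appendLast o (String.ofList (List.replicate (k / 2) '%')), decide (k % 2 = 1)) := by
  induction k using Nat.strong_induction_on with
  | _ k ih =>
    match k with
    | 0 => intro o ho; simp [appendLast_empty o ho]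
    | 1 =>
      intro o ho
      simp [List.replicate, aStep, appendLast_empty o ho]
    | n + 2 =>
      intro o ho
      have h2 : (n + 2) / 2 = n / 2 + 1 := by omega
      have h3 : (n + 2) % 2 = n % 2 := by omega
      rw [show List.replicate (n+2) '%' = '%' :: '%' :: List.replicate n '%' from rfl]
      simp only [List.foldl_cons]
      rw [show aStep (aStep (o, false) '%') '%' = (appendLast o (String.ofList ['%']), false) by
        simp [aStep]]
      rw [ih n (by omega) _ (appendLast_ne_nil o _)]
      rw [appendLast_append, h2, h3]
      have hcat : String.ofList ['%'] ++ String.ofList (List.replicate (n / 2) '%')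
           = String.ofList (List.replicate (n / 2 + 1) '%') := by
        rw [List.replicate_succ,
            show ('%' :: List.replicate (n / 2) '%') = ['%'] ++ List.replicate (n / 2) '%' from rfl,
            String.ofList_append]
      rw [hcat]

-- A on a run of k non-'%' characters starting with the flag down
lemma nonRun (k : Nat) (c : Char) (hc : c ≠ '%') : ∀ o : List String, o ≠ [] →
    (List.replicate k c).foldl aStep (o, false) =
      (appendLast o (String.ofList (List.replicate k c)), false) := by
  induction k with
  | zero => intro o ho; simp [appendLast_empty o ho]
  | succ n ih =>
    intro o ho
    rw [show List.replicate (n+1) c = c :: List.replicate n c from rfl]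
    simp only [List.foldl_cons]
    rw [show aStep (o, false) c = (appendLast o (String.ofList [c]), false) by simp [aStep, hc]]
    rw [ih _ (appendLast_ne_nil o _), appendLast_append]
    have hcat : String.ofList [c] ++ String.ofList (List.replicate n c)
         = String.ofList (List.replicate (n + 1) c) := by
      rw [List.replicate_succ,
          show (c :: List.replicate n c) = [c] ++ List.replicate n c from rfl,
          String.ofList_append]
    rw [hcat, List.replicate_succ]

-- the flag-up state entering a block not starting with '%' equals flag-down with a fresh token
lemma flagTrue (rest : List Char) (o : List String)
    (h : ∀ c, rest.head? = some c → c ≠ '%') :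
    aFin (rest.foldl aStep (o, true)) = aFin (rest.foldl aStep (o ++ [""], false)) := by
  cases rest with
  | nil => simp [aFin]
  | cons c t =>
    have hc : c ≠ '%' := h c rfl
    simp only [List.foldl_cons]
    rw [show aStep (o, true) c = aStep (o ++ [""], false) c by simp [aStep, hc]]

lemma main_lemma (cs : List Char) (o : List String) (ho : o ≠ []) :
    aFin (cs.foldl aStep (o, false)) = (runsB cs).foldl bStep o := by
  match cs with
  | [] => simp [runsB, aFin]
  | c :: cs' =>
    have hsplit : cs' = cs'.takeWhile (· == c) ++ cs'.dropWhile (· == c) :=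
      (List.takeWhile_append_dropWhile).symm
    have hpre : ∀ x ∈ cs'.takeWhile (· == c), x = c := by
      intro x hx
      have hb := List.mem_takeWhile_imp (p := (· == c)) hx
      exact eq_of_beq hb
    have hrepl : c :: cs'.takeWhile (· == c) =
        List.replicate ((cs'.takeWhile (· == c)).length + 1) c := by
      rw [List.replicate_succ]
      exact congrArg (c :: ·) (List.eq_replicate_of_mem hpre)
    have hpost : ∀ x, (cs'.dropWhile (· == c)).head? = some x → x ≠ c := by
      intro x hx hxc
      have h := List.head?_dropWhile_not (· == c) cs'
      rw [hx] at h
      simp [hxc] at h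
    have hlen : (cs'.dropWhile (· == c)).length < cs'.length + 1 :=
      Nat.lt_succ_of_le (List.dropWhile_sublist _).length_le
    rw [runsB]
    show aFin ((c :: cs').foldl aStep (o, false)) = _
    rw [show c :: cs' = (c :: cs'.takeWhile (· == c)) ++ cs'.dropWhile (· == c) by
          rw [List.cons_append]; exact congrArg (c :: ·) hsplit,
        List.foldl_append, hrepl]
    by_cases hc : c = '%'
    · subst hc
      rw [pctRun _ _ ho]
      by_cases hk : ((cs'.takeWhile (· == '%')).length + 1) % 2 = 1
      · simp only [hk, decide_true]
        rw [flagTrue _ _ (fun x hx => hpost x hx),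
            main_lemma (cs'.dropWhile (· == '%')) _ (by simp)]
        simp [bStep, hk]
      · simp only [hk, decide_false]
        rw [main_lemma (cs'.dropWhile (· == '%')) _ (appendLast_ne_nil o _)]
        simp [bStep, hk]
    · rw [nonRun _ _ hc _ ho,
          main_lemma (cs'.dropWhile (· == c)) _ (appendLast_ne_nil o _)]
      simp [bStep, hc]
termination_by cs.length
decreasing_by all_goals simpa using hlen

-- ===== VERDICT (by name: the statement is the Claim_ definition above) =====
theorem split_for_format_spec : Claim_equal_split_for_format := by
  intro command _
  show split_for_format command = split_for_format_alt command
  unfold split_for_format split_for_format_alt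
  exact main_lemma command.toList [""] (by simp)
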